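-- pv_equiv track=rewrite | github.com/VictorAurelius/2026-AI-Agent-Social-Automation | modules/book-translation/scripts/manage.py | _interleave_bilingual
-- ===== SOURCE A (Python) =====
-- def _interleave_bilingual(source_md: str, translated_md: str) -> str:
--     source_paras = [p for p in source_md.split("\n\n") if p.strip()]
--     trans_paras = [p for p in translated_md.split("\n\n") if p.strip()]
--     result = []
--     max_len = max(len(source_paras), len(trans_paras))
--     for i in range(max_len):
--         if i < len(source_paras):
--             result.append(f"*[EN] {source_paras[i]}*")
--         if i < len(trans_paras):
--             result.append(trans_paras[i])
--     return "\n\n".join(result)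
-- ===== SOURCE B (Python) =====
-- def _interleave_bilingual(source_md: str, translated_md: str) -> str:
--     source_paras = [p for p in source_md.split("\n\n") if p.strip()]
--     trans_paras = [p for p in translated_md.split("\n\n") if p.strip()]
--     # decorate: English paragraph i gets rank 2*i, translated paragraph i gets rank 2*i+1;
--     # sorting by rank yields exactly the bilingual interleaving (ranks are all distinct)
--     tagged = [(2 * i, f"*[EN] {p}*") for i, p in enumerate(source_paras)]
--     tagged += [(2 * i + 1, p) for i, p in enumerate(trans_paras)]
--     tagged.sort(key=lambda t: t[0])
--     return "\n\n".join(p for _, p in tagged)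
-- ===== Notes on version B (the rewrite author's own statement) =====
-- stated objective: alternative
-- what changed: Replaces A's guarded index loop over range(max(len,len)) by a decorate-sort-undecorate scheme: each English paragraph i is tagged with rank 2*i and each translated paragraph i with rank 2*i+1, the tagged list is sorted by rank, and the texts are joined; the distinct ranks make the sorted order exactly A's interleaving.
import Mathlib
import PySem

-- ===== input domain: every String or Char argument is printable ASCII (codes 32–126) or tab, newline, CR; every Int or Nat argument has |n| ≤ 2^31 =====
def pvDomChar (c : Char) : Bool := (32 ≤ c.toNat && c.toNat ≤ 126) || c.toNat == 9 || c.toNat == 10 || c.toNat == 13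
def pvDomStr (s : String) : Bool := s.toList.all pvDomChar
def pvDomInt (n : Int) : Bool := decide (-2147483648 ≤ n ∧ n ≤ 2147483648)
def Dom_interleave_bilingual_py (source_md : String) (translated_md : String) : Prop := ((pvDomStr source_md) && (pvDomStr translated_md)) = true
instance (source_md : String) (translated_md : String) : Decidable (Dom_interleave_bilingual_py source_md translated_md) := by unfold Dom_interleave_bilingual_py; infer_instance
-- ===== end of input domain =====

-- B replaces A's guarded index loop by decorate-sort-undecorate: rank 2*i for English paragraph i,
-- rank 2*i+1 for translated paragraph i, sort by rank, join — a different algorithm of similar cost.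

-- ===== PORT A =====
-- shared helpers (both Pythons compute these identically)
def pvEn (p : String) : String := "*[EN] " ++ p ++ "*"

def pvParas (md : String) : List String :=
  ((PySem.Str.split? md "\n\n").getD []).filter (fun p => !(PySem.Str.strip p == ""))

def interleave_bilingual_py (source_md : String) (translated_md : String) : String :=
  let sp := pvParas source_md
  let tp := pvParas translated_md
  let res := (PySem.List.pyRange 0 (max (sp.length : Int) (tp.length : Int)) 1).foldl
    (fun acc i =>
      let acc := if i < (sp.length : Int) then acc ++ [pvEn (PySem.List.pyGetD sp i "")] else acc
      if i < (tp.length : Int) then acc ++ [PySem.List.pyGetD tp i ""] else acc)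
    []
  PySem.Str.join "\n\n" res

-- ===== PORT B =====
def interleave_bilingual_py_alt (source_md : String) (translated_md : String) : String :=
  let sp := pvParas source_md
  let tp := pvParas translated_md
  let tagged := (PySem.List.enumerate sp).map (fun ip => (2 * ip.1, pvEn ip.2))
             ++ (PySem.List.enumerate tp).map (fun ip => (2 * ip.1 + 1, ip.2))
  let sorted := PySem.List.sorted tagged (fun t => t.1) false
  PySem.Str.join "\n\n" (sorted.map (fun t => t.2))

-- ===== PRECONDITION & SPEC =====
def Spec_interleave_bilingual_py (source_md : String) (translated_md : String) (out : String) : Prop := out = interleave_bilingual_py_alt source_md translated_md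
instance (source_md : String) (translated_md : String) (out : String) : Decidable (Spec_interleave_bilingual_py source_md translated_md out) := by unfold Spec_interleave_bilingual_py; infer_instance

-- ===== CLAIM (what is proved, stated in full; the proofs are below) =====
def Claim_equal_interleave_bilingual_py : Prop := ∀ (source_md : String) (translated_md : String), Dom_interleave_bilingual_py source_md translated_md → Spec_interleave_bilingual_py source_md translated_md (interleave_bilingual_py source_md translated_md)

-- ===== LEMMAS AND PROOFS =====

-- The interleaved tagged list, named: key 2*i for source paragraph i, 2*i+1 for translated paragraph i.
def pvMerge (i : Int) : List String → List String → List (Int × String)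
  | [], [] => []
  | s :: ss, [] => (2 * i, pvEn s) :: pvMerge (i + 1) ss []
  | [], t :: ts => (2 * i + 1, t) :: pvMerge (i + 1) [] ts
  | s :: ss, t :: ts => (2 * i, pvEn s) :: (2 * i + 1, t) :: pvMerge (i + 1) ss ts

theorem pvMerge_perm (sp : List String) : ∀ (tp : List String) (i : Int),
    (pvMerge i sp tp).Perm
      ((PySem.List.enumerate sp i).map (fun ip => (2 * ip.1, pvEn ip.2))
        ++ (PySem.List.enumerate tp i).map (fun ip => (2 * ip.1 + 1, ip.2))) := by
  induction sp with
  | nil =>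
    intro tp
    induction tp with
    | nil => intro i; simp [pvMerge, PySem.List.enumerate_nil]
    | cons t ts ih =>
      intro i
      simpa [pvMerge, PySem.List.enumerate_nil, PySem.List.enumerate_cons] using
        (ih (i + 1)).cons (2 * i + 1, t)
  | cons s ss ih =>
    intro tp
    cases tp with
    | nil =>
      intro i
      simpa [pvMerge, PySem.List.enumerate_nil, PySem.List.enumerate_cons] using
        (ih [] (i + 1)).cons (2 * i, pvEn s)
    | cons t ts =>
      intro i
      simp only [pvMerge, PySem.List.enumerate_cons, List.map_cons, List.cons_append]
      refine List.Perm.cons _ ?_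
      exact ((ih ts (i + 1)).cons (2 * i + 1, t)).trans List.perm_middle.symm

theorem pvMerge_key_lb (sp : List String) : ∀ (tp : List String) (i : Int),
    ∀ x ∈ pvMerge i sp tp, 2 * i ≤ x.1 := by
  induction sp with
  | nil =>
    intro tp
    induction tp with
    | nil => intro i x hx; simp [pvMerge] at hx
    | cons t ts ih =>
      intro i x hx
      simp only [pvMerge, List.mem_cons] at hx
      rcases hx with rfl | hx
      · omega
      · have := ih (i + 1) x hx; omega
  | cons s ss ih =>
    intro tp
    cases tp with
    | nil =>
      intro i x hx
      simp only [pvMerge, List.mem_cons] at hx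
      rcases hx with rfl | hx
      · omega
      · have := ih [] (i + 1) x hx; omega
    | cons t ts =>
      intro i x hx
      simp only [pvMerge, List.mem_cons] at hx
      rcases hx with rfl | rfl | hx
      · omega
      · omega
      · have := ih ts (i + 1) x hx; omega

theorem pvMerge_pairwise (sp : List String) : ∀ (tp : List String) (i : Int),
    (pvMerge i sp tp).Pairwise (fun a b => a.1 < b.1) := by
  induction sp with
  | nil =>
    intro tp
    induction tp with
    | nil => intro i; simp [pvMerge]
    | cons t ts ih =>
      intro i
      simp only [pvMerge]
      refine List.Pairwise.cons ?_ (ih (i + 1))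
      intro x hx
      have := pvMerge_key_lb [] ts (i + 1) x hx; dsimp; omega
  | cons s ss ih =>
    intro tp
    cases tp with
    | nil =>
      intro i
      simp only [pvMerge]
      refine List.Pairwise.cons ?_ (ih [] (i + 1))
      intro x hx
      have := pvMerge_key_lb ss [] (i + 1) x hx; dsimp; omega
    | cons t ts =>
      intro i
      simp only [pvMerge]
      refine List.Pairwise.cons ?_ (List.Pairwise.cons ?_ (ih ts (i + 1)))
      · intro x hx
        simp only [List.mem_cons] at hx
        rcases hx with rfl | hx
        · dsimp; omega
        · have := pvMerge_key_lb ss ts (i + 1) x hx; dsimp; omega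
      · intro x hx
        have := pvMerge_key_lb ss ts (i + 1) x hx; dsimp; omega

-- undecorating pvMerge gives exactly A's interleaved text list
theorem pvMerge_map_snd (sp : List String) : ∀ (tp : List String) (i : Int),
    (pvMerge i sp tp).map (fun t => t.2)
      = (sp.zip tp).flatMap (fun st => [pvEn st.1, st.2])
        ++ ((sp.drop (min sp.length tp.length)).map pvEn
        ++ tp.drop (min sp.length tp.length)) := by
  induction sp with
  | nil =>
    intro tp
    induction tp with
    | nil => intro i; simp [pvMerge]
    | cons t ts ih =>
      intro i
      simpa [pvMerge] using ih (i + 1)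
  | cons s ss ih =>
    intro tp
    cases tp with
    | nil =>
      intro i
      simpa [pvMerge] using ih [] (i + 1)
    | cons t ts =>
      intro i
      simpa [pvMerge] using ih ts (i + 1)

-- A's fold over range(max) equals the zip part plus the leftover tail
theorem pv_lists_eq (sp tp : List String) :
    (PySem.List.pyRange 0 (max (sp.length : Int) (tp.length : Int)) 1).foldl
      (fun acc i =>
        let acc := if i < (sp.length : Int) then acc ++ [pvEn (PySem.List.pyGetD sp i "")] else acc
        if i < (tp.length : Int) then acc ++ [PySem.List.pyGetD tp i ""] else acc)
      []
    = (sp.zip tp).foldl (fun acc st => acc ++ [pvEn st.1, st.2]) []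
      ++ (sp.drop (min sp.length tp.length)).map pvEn
      ++ tp.drop (min sp.length tp.length) := by
  rw [PySem.List.foldl_congr_mem _ _
      (fun acc i => acc ++
        ((if i < (sp.length:Int) then [pvEn (PySem.List.pyGetD sp i "")] else []) ++
         (if i < (tp.length:Int) then [PySem.List.pyGetD tp i ""] else []))) _
      (by intro acc x _; dsimp only; split_ifs <;> simp)]
  rw [PySem.List.foldl_append_eq_flatMap, List.nil_append]
  rw [PySem.List.foldl_append_eq_flatMap, List.nil_append]
  rw [PySem.List.pyRange_one_append 0 ((min sp.length tp.length : Nat) : Int) _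
      (by positivity) (by omega)]
  rw [List.flatMap_append, List.append_assoc]
  congr 1
  · -- prefix = zip part
    rw [List.flatMap_congr (g := fun i =>
        [pvEn (PySem.List.pyGetD (sp.zip tp) i ("", "")).1, (PySem.List.pyGetD (sp.zip tp) i ("", "")).2])
        (by
          intro i hi
          rw [PySem.List.mem_pyRange_one] at hi
          have h1 : i < (sp.length : Int) := by omega
          have h2 : i < (tp.length : Int) := by omega
          have hz : i < ((sp.zip tp).length : Int) := by simp [List.length_zip]; omega
          dsimp only
          rw [if_pos h1, if_pos h2,
              PySem.List.pyGetD_eq_getElem _ _ hi.1 h1,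
              PySem.List.pyGetD_eq_getElem _ _ hi.1 h2,
              PySem.List.pyGetD_eq_getElem _ _ hi.1 hz,
              List.getElem_zip]
          simp)]
    have hm : ((min sp.length tp.length : Nat) : Int) = PySem.List.len (sp.zip tp) := by
      simp [List.length_zip]
    rw [hm]
    conv_rhs => rw [← PySem.List.map_pyGetD_pyRange_zero (sp.zip tp) ("", ""), List.flatMap_map]
  · -- suffix = tails
    rcases le_total sp.length tp.length with h | h
    · have hmin : min sp.length tp.length = sp.length := Nat.min_eq_left h
      have hmax : max (sp.length : Int) (tp.length : Int) = (tp.length : Int) := by omega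
      rw [hmin, hmax, List.drop_length, List.map_nil, List.nil_append]
      rw [List.flatMap_congr (g := fun i => [PySem.List.pyGetD tp i ""])
          (by
            intro i hi
            rw [PySem.List.mem_pyRange_one] at hi
            have h1 : ¬ i < (sp.length : Int) := by omega
            have h2 : i < (tp.length : Int) := hi.2
            rw [if_neg h1, if_pos h2]
            simp)]
      rw [← List.map_eq_flatMap]
      have : (tp.length : Int) = PySem.List.len tp := by simp
      rw [this, PySem.List.map_pyGetD_pyRange tp "" (by positivity)]
      simp
    · have hmin : min sp.length tp.length = tp.length := Nat.min_eq_right h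
      have hmax : max (sp.length : Int) (tp.length : Int) = (sp.length : Int) := by omega
      rw [hmin, hmax, List.drop_length, List.append_nil]
      rw [List.flatMap_congr (g := fun i => [pvEn (PySem.List.pyGetD sp i "")])
          (by
            intro i hi
            rw [PySem.List.mem_pyRange_one] at hi
            have h1 : i < (sp.length : Int) := hi.2
            have h2 : ¬ i < (tp.length : Int) := by omega
            rw [if_pos h1, if_neg h2]
            simp)]
      rw [← List.map_eq_flatMap,
          show (fun i => pvEn (PySem.List.pyGetD sp i "")) = pvEn ∘ (fun i => PySem.List.pyGetD sp i "") from rfl,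
          ← List.map_map,
          show (sp.length : Int) = PySem.List.len sp by simp,
          PySem.List.map_pyGetD_pyRange sp "" (by positivity)]
      simp

-- ===== VERDICT (by name: the statement is the Claim_ definition above) =====
theorem interleave_bilingual_py_spec : Claim_equal_interleave_bilingual_py := by
  intro s t _
  show _ = _
  simp only [interleave_bilingual_py, interleave_bilingual_py_alt]
  have hsorted :
      PySem.List.sorted
        ((PySem.List.enumerate (pvParas s)).map (fun ip => (2 * ip.1, pvEn ip.2))
          ++ (PySem.List.enumerate (pvParas t)).map (fun ip => (2 * ip.1 + 1, ip.2)))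
        (fun p => p.1) false = pvMerge 0 (pvParas s) (pvParas t) :=
    PySem.List.sorted_eq_of_perm_of_pairwise_lt _ _ (fun p : Int × String => p.1)
      (pvMerge_perm (pvParas s) (pvParas t) 0)
      (pvMerge_pairwise (pvParas s) (pvParas t) 0)
  rw [pv_lists_eq, PySem.List.foldl_append_eq_flatMap, List.nil_append]
  rw [hsorted, pvMerge_map_snd]
  simp [List.append_assoc]
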